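-- pv_equiv track=rewrite | github.com/arpbhusa8/python_simple | hierarchy_paths.py | ordered_alignment_table
-- ===== SOURCE A (Python) =====
-- from typing import Dict, List, Any, Tuple
--
-- def ordered_alignment_table(ga_list: List[str], customer_path: List[str]) -> Tuple[List[Tuple[str, str, str]], List[str], List[str]]:
--     """
--     Aligns GA and customer path in order, matching each GA dimension to the next available customer dimension.
--     Returns:
--         - List of (GA, Customer, Match) tuples for the table
--         - List of unmatched GA dimensions
--         - List of unmatched customer dimensions
--     """
--     table = []
--     ga_idx = 0
--     cust_idx = 0
--     matched_cust_indices = set()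
--     unmatched_ga = []
--     unmatched_cust = []
--     # For each GA dimension, find the next matching customer dimension
--     while ga_idx < len(ga_list):
--         ga_dim = ga_list[ga_idx]
--         found = False
--         for i in range(cust_idx, len(customer_path)):
--             if customer_path[i].lower() == ga_dim.lower():
--                 table.append((ga_dim, customer_path[i], '✓'))
--                 matched_cust_indices.add(i)
--                 cust_idx = i + 1
--                 found = True
--                 break
--         if not found:
--             table.append((ga_dim, '', '✗'))
--             unmatched_ga.append(ga_dim)
--         ga_idx += 1
--     # Any customer dimensions not matched are extra
--     for i, dim in enumerate(customer_path):
--         if i not in matched_cust_indices: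
--             unmatched_cust.append(dim)
--     return table, unmatched_ga, unmatched_cust
-- ===== SOURCE B (Python) =====
-- def _bisect_left(a, x):
--     # hand-rolled bisect_left (A imports no stdlib modules, so no bisect import)
--     lo, hi = 0, len(a)
--     while lo < hi:
--         mid = (lo + hi) // 2
--         if a[mid] < x:
--             lo = mid + 1
--         else:
--             hi = mid
--     return lo
--
--
-- def ordered_alignment_table(ga_list, customer_path):
--     # Stage 1: index each customer dimension's positions (ascending) by lowercase name.
--     pos = {}
--     for i, dim in enumerate(customer_path):
--         pos.setdefault(dim.lower(), []).append(i)
--     # Stage 2: one pass over ga_list computing only the matched index (or None) per GA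
--     # dimension, binary-searching that dimension's own position list for the first
--     # position >= cust (greedy, positions strictly increase).
--     hits = []
--     cust = 0
--     for g in ga_list:
--         lst = pos.get(g.lower(), [])
--         j = _bisect_left(lst, cust)
--         if j < len(lst):
--             hits.append(lst[j])
--             cust = lst[j] + 1
--         else:
--             hits.append(None)
--     # Stage 3: assemble all three outputs from the hits list.
--     table = [(g, customer_path[h], '\u2713') if h is not None else (g, '', '\u2717')
--              for g, h in zip(ga_list, hits)]
--     unmatched_ga = [g for g, h in zip(ga_list, hits) if h is None]
--     matched = set(h for h in hits if h is not None)
--     unmatched_cust = [d for i, d in enumerate(customer_path) if i not in matched]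
--     return table, unmatched_ga, unmatched_cust
-- ===== Notes on version B (the rewrite author's own statement) =====
-- stated objective: faster
-- what changed: B replaces A's per-GA rescan of the whole customer path by three staged passes: build a dict of each lowercased customer dimension's ascending position list once, compute the matched index per GA dimension with a hand-rolled binary search for the first position >= cust, then assemble table/unmatched lists from that hits list.
import Mathlib
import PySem

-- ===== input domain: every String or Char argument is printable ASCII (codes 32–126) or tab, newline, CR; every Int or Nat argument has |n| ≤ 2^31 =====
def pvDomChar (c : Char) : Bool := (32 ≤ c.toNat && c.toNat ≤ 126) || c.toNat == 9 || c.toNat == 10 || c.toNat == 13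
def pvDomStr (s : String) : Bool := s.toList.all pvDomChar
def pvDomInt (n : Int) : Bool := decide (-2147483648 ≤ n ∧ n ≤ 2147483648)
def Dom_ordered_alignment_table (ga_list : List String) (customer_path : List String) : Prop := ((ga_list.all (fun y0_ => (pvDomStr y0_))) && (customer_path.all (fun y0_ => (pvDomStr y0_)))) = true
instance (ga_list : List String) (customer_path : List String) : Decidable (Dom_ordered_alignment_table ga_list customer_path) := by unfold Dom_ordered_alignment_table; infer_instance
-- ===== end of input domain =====

-- B stages the work: a dict of per-dimension ascending position lists built once, a binary
-- search per GA dimension producing a hits list, and the three outputs assembled from it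
-- (objective: faster; A rescans the customer path for every GA dimension).

-- ===== PORT A =====
-- inner loop 'for i in range(cust_idx, len(customer_path)): if … : break' — first hit wins
def oatFindA (customer_path : List String) (key : String) : List Int → Option Int
  | [] => none
  | i :: rest =>
    if PySem.Str.lower (PySem.List.pyGetD customer_path i "") == key then some i
    else oatFindA customer_path key rest

-- the while loop over ga_list; state (cust_idx, matched_cust_indices, table, unmatched_ga)
def oatLoopA (customer_path : List String) :
    List String → Int → PySem.Set Int →
    List (String × String × String) → List String →
    (List (String × String × String)) × List String × PySem.Set Int
  | [], _, matched, table, ug => (table, ug, matched)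
  | g :: rest, cust_idx, matched, table, ug =>
    match oatFindA customer_path (PySem.Str.lower g)
        (PySem.List.pyRange cust_idx (customer_path.length : Int) 1) with
    | some i =>
        oatLoopA customer_path rest (i + 1) (PySem.Set.add matched i)
          (table ++ [(g, PySem.List.pyGetD customer_path i "", "✓")]) ug
    | none =>
        oatLoopA customer_path rest cust_idx matched
          (table ++ [(g, "", "✗")]) (ug ++ [g])

def ordered_alignment_table (ga_list : List String) (customer_path : List String) :
    (List (String × String × String)) × List String × List String :=
  let r := oatLoopA customer_path ga_list 0 PySem.Set.empty [] []
  let matched := r.2.2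
  -- 'for i, dim in enumerate(customer_path): if i not in matched: unmatched_cust.append(dim)'
  let unmatched_cust := (PySem.List.enumerate customer_path).foldl
      (fun acc p => if !(PySem.Set.contains matched p.1) then acc ++ [p.2] else acc) []
  (r.1, r.2.1, unmatched_cust)

-- ===== PORT B =====
-- stage 1: 'pos.setdefault(dim.lower(), []).append(i)' over enumerate(customer_path)
def oatPos (customer_path : List String) : PySem.Dict String (List Int) :=
  (PySem.List.enumerate customer_path).foldl
    (fun d p => d.modify (PySem.Str.lower p.2) [] (· ++ [p.1])) PySem.Dict.empty

-- '_bisect_left(a, x)': the while loop on (lo, hi); a[mid] is in range on every reachable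
-- call (lo < hi ≤ len a), so pyGetD's default is never used there
def oatBisect (a : List Int) (x : Int) (lo hi : Nat) : Nat :=
  if _h : lo < hi then
    -- mid = (lo + hi) // 2, inlined
    if PySem.List.pyGetD a (((lo + hi) / 2 : Nat) : Int) 0 < x then oatBisect a x ((lo + hi) / 2 + 1) hi
    else oatBisect a x lo ((lo + hi) / 2)
  else lo
termination_by hi - lo
decreasing_by all_goals omega

-- stage 2: the 'for g in ga_list' loop accumulating only (hits, cust)
def oatHits (pos : PySem.Dict String (List Int)) : List String → Int → List (Option Int)
  | [], _ => []
  | g :: rest, cust =>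
    let lst := pos.getD (PySem.Str.lower g) []
    let j := oatBisect lst cust 0 lst.length
    if j < lst.length then
      let h := PySem.List.pyGetD lst (j : Int) 0
      some h :: oatHits pos rest (h + 1)
    else
      none :: oatHits pos rest cust

-- stage 3: the three comprehensions over (ga_list, hits) and customer_path
def ordered_alignment_table_alt (ga_list : List String) (customer_path : List String) :
    (List (String × String × String)) × List String × List String :=
  let pos := oatPos customer_path
  let hits := oatHits pos ga_list 0
  let table := (ga_list.zip hits).map (fun p =>
      match p.2 with
      | some i => (p.1, PySem.List.pyGetD customer_path i "", "✓")
      | none => (p.1, "", "✗"))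
  let unmatched_ga := ((ga_list.zip hits).filter (fun p => p.2.isNone)).map (·.1)
  let matched := PySem.Set.ofList (hits.filterMap id)
  let unmatched_cust := ((PySem.List.enumerate customer_path).filter
      (fun p => !(PySem.Set.contains matched p.1))).map (·.2)
  (table, unmatched_ga, unmatched_cust)

-- ===== PRECONDITION & SPEC =====
def Spec_ordered_alignment_table (ga_list : List String) (customer_path : List String) (out : (List (String × String × String)) × List String × List String) : Prop := out = ordered_alignment_table_alt ga_list customer_path
instance (ga_list : List String) (customer_path : List String) (out : (List (String × String × String)) × List String × List String) : Decidable (Spec_ordered_alignment_table ga_list customer_path out) := by unfold Spec_ordered_alignment_table; infer_instance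

-- ===== CLAIM (what is proved, stated in full; the proofs are below) =====
def Claim_equal_ordered_alignment_table : Prop := ∀ (ga_list : List String) (customer_path : List String), Dom_ordered_alignment_table ga_list customer_path → Spec_ordered_alignment_table ga_list customer_path (ordered_alignment_table ga_list customer_path)

-- ===== LEMMAS AND PROOFS =====

-- the list of match positions of `key`, in ascending order
def oatPosL (customer_path : List String) (key : String) : List Int :=
  ((PySem.List.enumerate customer_path).filter
      (fun p => PySem.Str.lower p.2 == key)).map (·.1)

theorem oatPos_getD (customer_path : List String) (key : String) :
    (oatPos customer_path).getD key [] = oatPosL customer_path key := by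
  have gen : ∀ (l : List (Int × String)) (d : PySem.Dict String (List Int)),
      (l.foldl (fun d p => d.modify (PySem.Str.lower p.2) [] (· ++ [p.1])) d).getD key []
        = d.getD key [] ++ (l.filter (fun p => PySem.Str.lower p.2 == key)).map (·.1) := by
    intro l
    induction l with
    | nil => intro d; simp
    | cons p l ih =>
      intro d
      rw [List.foldl_cons, ih, List.filter_cons]
      by_cases hp : (PySem.Str.lower p.2 == key) = true
      · have heq : PySem.Str.lower p.2 = key := beq_iff_eq.mp hp
        rw [if_pos hp, PySem.Dict.getD_modify, heq, if_pos rfl]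
        simp
      · rw [if_neg hp, PySem.Dict.getD_modify,
          if_neg (fun h => hp (beq_iff_eq.mpr h.symm))]
  unfold oatPos oatPosL
  rw [gen]
  simp

theorem oatPosL_mem (customer_path : List String) (key : String) (i : Int) :
    i ∈ oatPosL customer_path key ↔
      ∃ k : Nat, ∃ h : k < customer_path.length,
        i = (k : Int) ∧ (PySem.Str.lower customer_path[k] == key) = true := by
  unfold oatPosL
  constructor
  · intro h
    obtain ⟨p, hp, rfl⟩ := List.mem_map.mp h
    obtain ⟨hmem, hkey⟩ := List.mem_filter.mp hp
    obtain ⟨k, hk, rfl⟩ := (PySem.List.mem_enumerate_iff _ _ _).mp hmem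
    exact ⟨k, hk, by simp, hkey⟩
  · rintro ⟨k, hk, rfl, hkey⟩
    refine List.mem_map.mpr ⟨((k : Int), customer_path[k]), List.mem_filter.mpr ⟨?_, hkey⟩, rfl⟩
    exact (PySem.List.mem_enumerate_iff _ _ _).mpr ⟨k, hk, by simp⟩

theorem oatPosL_pairwise (customer_path : List String) (key : String) :
    (oatPosL customer_path key).Pairwise (· < ·) := by
  unfold oatPosL
  exact List.pairwise_map.mpr
    ((PySem.List.pairwise_lt_enumerate customer_path 0).filter _)

-- first element ≥ c of a strictly increasing list containing c is c itself
theorem find?_ge_of_mem_sorted (L : List Int) (c : Int)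
    (hs : L.Pairwise (· < ·)) (hm : c ∈ L) :
    L.find? (fun i => decide (c ≤ i)) = some c := by
  induction L with
  | nil => cases hm
  | cons a L ih =>
    obtain ⟨ha, hs'⟩ := List.pairwise_cons.mp hs
    by_cases hca : c ≤ a
    · have hac : a = c := by
        rcases List.mem_cons.mp hm with h | h
        · omega
        · have := ha c h; omega
      simp only [List.find?, decide_eq_true hca]
      rw [hac]
    · have hmem : c ∈ L := by
        rcases List.mem_cons.mp hm with h | h
        · omega
        · exact h
      simp only [List.find?, decide_eq_false hca]
      exact ih hs' hmem

theorem find?_congr_mem {α : Type} (L : List α) (p q : α → Bool)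
    (h : ∀ x ∈ L, p x = q x) : L.find? p = L.find? q := by
  induction L with
  | nil => rfl
  | cons a L ih =>
    simp only [List.find?, h a (by simp)]
    cases q a
    · exact ih (fun x hx => h x (List.mem_cons_of_mem a hx))
    · rfl

-- A's linear scan from c equals the first position ≥ c in the key's position list
theorem oatFind_eq (customer_path : List String) (key : String) (c : Nat) :
    oatFindA customer_path key
        (PySem.List.pyRange (c : Int) (customer_path.length : Int) 1)
      = (oatPosL customer_path key).find? (fun i => decide ((c : Int) ≤ i)) := by
  have main : ∀ (n c : Nat), customer_path.length - c = n →
      oatFindA customer_path key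
          (PySem.List.pyRange (c : Int) (customer_path.length : Int) 1)
        = (oatPosL customer_path key).find? (fun i => decide ((c : Int) ≤ i)) := by
    intro n
    induction n with
    | zero =>
      intro c hc
      have hle : customer_path.length ≤ c := by omega
      rw [PySem.List.pyRange_one, show ((customer_path.length : Int) - (c : Int)).toNat = 0 by omega]
      simp only [List.range_zero, List.map_nil, oatFindA]
      symm
      rw [List.find?_eq_none]
      intro i hi
      obtain ⟨k, hk, rfl, _⟩ := (oatPosL_mem customer_path key i).mp hi
      simp only [decide_eq_true_eq]
      omega
    | succ n ih =>
      intro c hc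
      have hlt : c < customer_path.length := by omega
      rw [PySem.List.pyRange_one_cons (by exact_mod_cast hlt)]
      simp only [oatFindA]
      rw [PySem.List.pyGetD_natCast, List.getD_eq_getElem _ _ hlt]
      by_cases hb : (PySem.Str.lower customer_path[c] == key) = true
      · rw [if_pos hb]
        symm
        exact find?_ge_of_mem_sorted _ _ (oatPosL_pairwise customer_path key)
          ((oatPosL_mem customer_path key _).mpr ⟨c, hlt, rfl, hb⟩)
      · rw [if_neg hb, show ((c : Int) + 1) = ((c + 1 : Nat) : Int) by push_cast; ring,
          ih (c + 1) (by omega)]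
        apply find?_congr_mem
        intro i hi
        obtain ⟨k, hk, rfl, hkey⟩ := (oatPosL_mem customer_path key i).mp hi
        have hne : k ≠ c := by rintro rfl; exact hb hkey
        simp only [decide_eq_decide]
        push_cast
        omega
  exact main (customer_path.length - c) c rfl

-- bisect invariant: the returned index separates the < x prefix from the ≥ x suffix
theorem oatBisect_inv (L : List Int) (x : Int) (hs : L.Pairwise (· < ·)) :
    ∀ (lo hi : Nat), lo ≤ hi → hi ≤ L.length →
      (∀ k (hk : k < L.length), k < lo → L[k] < x) →
      (∀ k (hk : k < L.length), hi ≤ k → x ≤ L[k]) →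
      (oatBisect L x lo hi ≤ L.length ∧
       (∀ k (hk : k < L.length), k < oatBisect L x lo hi → L[k] < x) ∧
       (∀ k (hk : k < L.length), oatBisect L x lo hi ≤ k → x ≤ L[k])) := by
  have sorted : ∀ i j (hi : i < L.length) (hj : j < L.length), i ≤ j → L[i] ≤ L[j] := by
    intro i j hi hj hij
    rcases Nat.lt_or_ge i j with h | h
    · exact le_of_lt (List.pairwise_iff_getElem.mp hs i j hi hj h)
    · have : i = j := by omega
      subst this; rfl
  intro lo hi
  induction' hd : hi - lo using Nat.strong_induction_on with n ihn generalizing lo hi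
  intro hlohi hhi hlo hge
  by_cases h : lo < hi
  · have hmidlt : (lo + hi) / 2 < L.length := by omega
    rw [oatBisect, dif_pos h, PySem.List.pyGetD_natCast, List.getD_eq_getElem _ _ hmidlt]
    by_cases hx : L[(lo + hi) / 2] < x
    · rw [if_pos hx]
      exact ihn (hi - ((lo + hi) / 2 + 1)) (by omega) ((lo + hi) / 2 + 1) hi rfl (by omega) hhi
        (fun k hk hklt => lt_of_le_of_lt (sorted k _ hk hmidlt (by omega)) hx) hge
    · rw [if_neg hx]
      exact ihn ((lo + hi) / 2 - lo) (by omega) lo ((lo + hi) / 2) rfl (by omega) (by omega) hlo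
        (fun k hk hkge => le_trans (le_of_not_gt hx) (sorted _ k hmidlt hk hkge))
  · rw [oatBisect, dif_neg h]
    exact ⟨by omega, fun k hk hklt => hlo k hk (by omega), fun k hk hkge => hge k hk (by omega)⟩

-- find? of the first-index characterisation
theorem find?_of_sep (L : List Int) (x : Int) (j : Nat) (hj : j ≤ L.length)
    (hbefore : ∀ k (hk : k < L.length), k < j → L[k] < x)
    (hafter : ∀ k (hk : k < L.length), j ≤ k → x ≤ L[k]) :
    L.find? (fun i => decide (x ≤ i)) =
      if h : j < L.length then some L[j] else none := by
  induction L generalizing j with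
  | nil => simp
  | cons a L ih =>
    cases j with
    | zero =>
      have hx : x ≤ a := hafter 0 (by simp) (by omega)
      simp [List.find?, decide_eq_true hx]
    | succ j =>
      have hax : a < x := hbefore 0 (by simp) (by omega)
      simp only [List.find?, decide_eq_false (not_le.mpr hax)]
      rw [ih j (by simp at hj; omega)
        (fun k hk hklt => by
          simpa using hbefore (k + 1) (by simpa using Nat.succ_lt_succ hk) (by omega))
        (fun k hk hkge => by
          simpa using hafter (k + 1) (by simpa using Nat.succ_lt_succ hk) (by omega))]
      by_cases hlt : j < L.length
      · rw [dif_pos hlt, dif_pos (by simpa using Nat.succ_lt_succ hlt)]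
        simp
      · rw [dif_neg hlt, dif_neg (by simp; omega)]

-- B's binary-search probe equals the find? of the first position ≥ x
theorem oatBisect_find (L : List Int) (x : Int) (hs : L.Pairwise (· < ·)) :
    L.find? (fun i => decide (x ≤ i)) =
      if h : oatBisect L x 0 L.length < L.length
      then some L[oatBisect L x 0 L.length] else none := by
  obtain ⟨hle, hb, ha⟩ := oatBisect_inv L x hs 0 L.length (Nat.zero_le _) le_rfl
    (fun k hk h0 => absurd h0 (by omega)) (fun k hk hk2 => absurd hk2 (by omega))
  exact find?_of_sep L x _ hle hb ha

-- the staged B loop agrees step by step with A's accumulator loop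
theorem oatLoop_eq (customer_path : List String) (gas : List String) (c : Nat)
    (m : PySem.Set Int) (tbl : List (String × String × String)) (ug : List String) :
    oatLoopA customer_path gas (c : Int) m tbl ug
      = (tbl ++ (gas.zip (oatHits (oatPos customer_path) gas (c : Int))).map (fun p =>
            match p.2 with
            | some i => (p.1, PySem.List.pyGetD customer_path i "", "✓")
            | none => (p.1, "", "✗")),
         ug ++ (((gas.zip (oatHits (oatPos customer_path) gas (c : Int))).filter
            (fun p => p.2.isNone)).map (·.1)),
         ((oatHits (oatPos customer_path) gas (c : Int)).filterMap id).foldl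
            PySem.Set.add m) := by
  induction gas generalizing c m tbl ug with
  | nil => simp [oatLoopA, oatHits]
  | cons g rest ih =>
    rw [oatLoopA, oatFind_eq,
      oatBisect_find _ _ (oatPosL_pairwise customer_path (PySem.Str.lower g))]
    simp only [oatHits, oatPos_getD]
    by_cases hj : oatBisect (oatPosL customer_path (PySem.Str.lower g)) (c : Int) 0
        (oatPosL customer_path (PySem.Str.lower g)).length
        < (oatPosL customer_path (PySem.Str.lower g)).length
    · rw [dif_pos hj, if_pos hj]
      have hgetd : PySem.List.pyGetD (oatPosL customer_path (PySem.Str.lower g))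
          ((oatBisect (oatPosL customer_path (PySem.Str.lower g)) (c : Int) 0
              (oatPosL customer_path (PySem.Str.lower g)).length : Nat) : Int) 0
          = (oatPosL customer_path (PySem.Str.lower g))[oatBisect
              (oatPosL customer_path (PySem.Str.lower g)) (c : Int) 0
              (oatPosL customer_path (PySem.Str.lower g)).length] := by
        rw [PySem.List.pyGetD_natCast, List.getD_eq_getElem _ _ hj]
      rw [hgetd]
      obtain ⟨k, hk, hke, -⟩ := (oatPosL_mem customer_path (PySem.Str.lower g) _).mp
        ((oatPosL customer_path (PySem.Str.lower g)).getElem_mem hj)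
      rw [hke]
      have ih' := ih (k + 1)
      push_cast at ih'
      simp [ih']
    · rw [dif_neg hj, if_neg hj]
      simp [ih c]

-- 'for x: if x in s: pass else: out.append(f(x))' as a filter+map
theorem pv_foldl_skip {α β : Type} (p : α → Prop) [DecidablePred p] (f : α → β)
    (l : List α) (acc : List β) :
    l.foldl (fun acc x => if p x then acc else acc ++ [f x]) acc
      = acc ++ (l.filter (fun x => !decide (p x))).map f := by
  induction l generalizing acc with
  | nil => simp
  | cons a l ih => by_cases h : p a <;> simp [h, ih]

-- ===== VERDICT (by name: the statement is the Claim_ definition above) =====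
theorem ordered_alignment_table_spec : Claim_equal_ordered_alignment_table := by
  intro ga_list customer_path _
  unfold Spec_ordered_alignment_table ordered_alignment_table ordered_alignment_table_alt
  have h0 : (0 : Int) = ((0 : Nat) : Int) := rfl
  rw [h0, oatLoop_eq]
  simp [PySem.Set.ofList_eq_foldl, PySem.Set.empty]
  rw [pv_foldl_skip]
  simp
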